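-- pv_equiv track=rewrite | github.com/some1mine/boj | 백준/Silver/20529. 가장 가까운 세 사람의 심리적 거리/가장 가까운 세 사람의 심리적 거리.py | solution
-- ===== SOURCE A (Python) =====
-- def getnum(s1, s2,  s3):
--     d = 0
--     for i in range(4):
--         if s1[i] != s2[i]: d += 1
--         if s1[i] != s3[i]: d += 1
--         if s2[i] != s3[i]: d += 1
--     return d
--
-- def solution(arr):
--     ret = 12
--     if len(arr) > 32: return 0
--
--     for i in range(0, len(arr)):
--         for j in range(i + 1, len(arr)):
--             for k in range(j + 1, len(arr)):
--                 ret = min(ret, getnum(arr[i], arr[j], arr[k]))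
--     return ret
-- ===== SOURCE B (Python) =====
-- def solution(arr):
--     if len(arr) > 32:
--         return 0
--     if len(arr) < 3:
--         return 12
--     # group by the 4-character MBTI key: the distance depends only on the key,
--     # so minimise over multisets of three keys instead of over index triples
--     cnt = {}
--     for s in arr:
--         k = s[:4]
--         cnt[k] = cnt.get(k, 0) + 1
--     keys = list(cnt)
--
--     def d(a, b):
--         return sum(x != y for x, y in zip(a, b))
--
--     best = 12
--     m = len(keys)
--     for x in range(m):
--         for y in range(x, m):
--             for z in range(y, m):
--                 if x == y and y == z:
--                     ok = cnt[keys[x]] >= 3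
--                 elif x == y:
--                     ok = cnt[keys[x]] >= 2
--                 elif y == z:
--                     ok = cnt[keys[y]] >= 2
--                 else:
--                     ok = True
--                 if ok:
--                     best = min(best, d(keys[x], keys[y]) + d(keys[x], keys[z]) + d(keys[y], keys[z]))
--     return best
-- ===== Notes on version B (the rewrite author's own statement) =====
-- stated objective: alternative
-- what changed: B groups the people by their 4-character MBTI key into a count table and minimises over multisets of (at most 30) distinct keys with a multiplicity-feasibility test, instead of brute-forcing all index triples of the input; correct because the distance depends only on the keys.
import Mathlib
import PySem

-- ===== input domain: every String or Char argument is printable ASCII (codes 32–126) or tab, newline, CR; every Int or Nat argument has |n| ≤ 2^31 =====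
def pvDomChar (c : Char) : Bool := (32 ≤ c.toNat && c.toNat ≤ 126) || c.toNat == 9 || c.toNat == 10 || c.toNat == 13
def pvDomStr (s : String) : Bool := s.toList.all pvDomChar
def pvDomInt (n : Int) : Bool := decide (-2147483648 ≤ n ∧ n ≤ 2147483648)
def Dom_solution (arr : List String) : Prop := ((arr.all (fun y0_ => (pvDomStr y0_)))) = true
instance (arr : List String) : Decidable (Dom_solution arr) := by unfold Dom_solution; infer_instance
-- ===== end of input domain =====

-- B groups the input by its 4-character key into a count table and minimises over key multisets
-- instead of over all index triples; same return value, alternative algorithm.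

-- ===== PORT A =====
-- s[i] for an index Pre_ keeps in range (Pre_ excludes strings shorter than 4 whenever the triple loop runs)
def pvGetC (s : String) (i : Int) : Char := (PySem.Str.pyGet? s i).getD ' '
-- arr[i]; the loops keep i in range
def pvGetS (arr : List String) (i : Int) : String := (PySem.List.pyGet? arr i).getD ""

def getnum (s1 s2 s3 : String) : Int :=
  (PySem.List.pyRange 0 4 1).foldl (fun d i =>
    let d := if pvGetC s1 i ≠ pvGetC s2 i then d + 1 else d
    let d := if pvGetC s1 i ≠ pvGetC s3 i then d + 1 else d
    if pvGetC s2 i ≠ pvGetC s3 i then d + 1 else d) 0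

def solution (arr : List String) : Int :=
  if (arr.length : Int) > 32 then 0
  else
    (PySem.List.pyRange 0 (arr.length : Int) 1).foldl (fun ret i =>
      (PySem.List.pyRange (i + 1) (arr.length : Int) 1).foldl (fun ret j =>
        (PySem.List.pyRange (j + 1) (arr.length : Int) 1).foldl (fun ret k =>
          min ret (getnum (pvGetS arr i) (pvGetS arr j) (pvGetS arr k))) ret) ret) 12

-- ===== PORT B =====
-- s[:4]
def keyOf (s : String) : String := PySem.Str.slice s none (some 4)
-- sum(x != y for x, y in zip(a, b))
def pairSum (a b : String) : Int :=
  ((a.toList.zip b.toList).map (fun xy => if xy.1 ≠ xy.2 then (1 : Int) else 0)).sum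

def solution_alt (arr : List String) : Int :=
  if (arr.length : Int) > 32 then 0
  else if (arr.length : Int) < 3 then 12
  else
    let cnt : PySem.Dict String Int :=
      arr.foldl (fun d s => d.insert (keyOf s) (d.getD (keyOf s) 0 + 1)) PySem.Dict.empty
    let keys : List String := cnt.keys
    let m : Int := keys.length
    (PySem.List.pyRange 0 m 1).foldl (fun best x =>
      (PySem.List.pyRange x m 1).foldl (fun best y =>
        (PySem.List.pyRange y m 1).foldl (fun best z =>
          let ok : Bool :=
            if x = y ∧ y = z then decide (3 ≤ cnt.getD (pvGetS keys x) 0)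
            else if x = y then decide (2 ≤ cnt.getD (pvGetS keys x) 0)
            else if y = z then decide (2 ≤ cnt.getD (pvGetS keys y) 0)
            else true
          if ok then
            min best (pairSum (pvGetS keys x) (pvGetS keys y) +
                      pairSum (pvGetS keys x) (pvGetS keys z) +
                      pairSum (pvGetS keys y) (pvGetS keys z))
          else best) best) best) 12

-- ===== PRECONDITION & SPEC =====
-- Pre_ excludes exactly the inputs where the Python A raises: 3..32 strings of which one is
-- shorter than 4 characters — there A's getnum raises IndexError.
def Pre_solution (arr : List String) : Prop :=
  32 < (arr.length : Int) ∨ arr.length < 3 ∨ ∀ s ∈ arr, 4 ≤ s.toList.length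
instance (arr : List String) : Decidable (Pre_solution arr) := by unfold Pre_solution; infer_instance

def pvWitness_solution : List String := ["ISTJ", "ENFP", "INTP"]

def Spec_solution (arr : List String) (out : Int) : Prop := out = solution_alt arr
instance (arr : List String) (out : Int) : Decidable (Spec_solution arr out) := by unfold Spec_solution; infer_instance

-- ===== CLAIM (what is proved, stated in full; the proofs are below) =====
def Claim_equal_solution : Prop := ∀ (arr : List String), Dom_solution arr → Pre_solution arr → Spec_solution arr (solution arr)

-- ===== LEMMAS AND PROOFS =====

-- the value A and B both minimise: the summed pairwise distance of three keys
def G (a b c : String) : Int := pairSum a b + pairSum a c + pairSum b c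

-- proof-side accessor: l[t] for a Nat index, total
def gd (l : List String) (t : Nat) : String := l.getD t ""

-- B's feasibility test, written over counts of the underlying key list
def okN (ks : List String) (x y z : Nat) : Bool :=
  if x = y ∧ y = z then decide (3 ≤ (ks.count (gd (PySem.Set.ofList ks) x) : Int))
  else if x = y then decide (2 ≤ (ks.count (gd (PySem.Set.ofList ks) x) : Int))
  else if y = z then decide (2 ≤ (ks.count (gd (PySem.Set.ofList ks) y) : Int))
  else true

theorem zipSum_comm (l1 l2 : List Char) :
    ((l1.zip l2).map (fun xy => if xy.1 ≠ xy.2 then (1 : Int) else 0)).sum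
      = ((l2.zip l1).map (fun xy => if xy.1 ≠ xy.2 then (1 : Int) else 0)).sum := by
  induction l1 generalizing l2 with
  | nil => simp
  | cons a t ih =>
    cases l2 with
    | nil => simp
    | cons b u =>
      simp only [List.zip_cons_cons, List.map_cons, List.sum_cons]
      rw [ih]
      congr 1
      by_cases h : a = b <;> simp [h, eq_comm]

theorem pairSum_comm (a b : String) : pairSum a b = pairSum b a := by
  unfold pairSum; exact zipSum_comm _ _

theorem Gswap1 (a b c : String) : G a b c = G b a c := by
  unfold G; rw [pairSum_comm a b, pairSum_comm a c, pairSum_comm b c]; ring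

theorem Gswap2 (a b c : String) : G a b c = G a c b := by
  unfold G; rw [pairSum_comm b c]; ring

theorem four_chars (s : String) (h : 4 ≤ s.toList.length) :
    ∃ c0 c1 c2 c3 t, s.toList = c0 :: c1 :: c2 :: c3 :: t := by
  rcases hl : s.toList with _ | ⟨c0, _ | ⟨c1, _ | ⟨c2, _ | ⟨c3, t⟩⟩⟩⟩ <;>
    rw [hl] at h <;> simp at h <;> exact ⟨c0, c1, c2, c3, t, rfl⟩

theorem getnum_step (p q r : Prop) [Decidable p] [Decidable q] [Decidable r] (d : Int) :
    (if r then (if q then (if p then d + 1 else d) + 1 else (if p then d + 1 else d)) + 1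
     else (if q then (if p then d + 1 else d) + 1 else (if p then d + 1 else d)))
      = d + (if p then 1 else 0) + (if q then 1 else 0) + (if r then 1 else 0) := by
  split_ifs <;> omega

set_option maxHeartbeats 1000000 in
theorem getnum_eq (s1 s2 s3 : String) (h1 : 4 ≤ s1.toList.length)
    (h2 : 4 ≤ s2.toList.length) (h3 : 4 ≤ s3.toList.length) :
    getnum s1 s2 s3 = G (keyOf s1) (keyOf s2) (keyOf s3) := by
  obtain ⟨a0, a1, a2, a3, t1, hl1⟩ := four_chars s1 h1
  obtain ⟨b0, b1, b2, b3, t2, hl2⟩ := four_chars s2 h2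
  obtain ⟨c0, c1, c2, c3, t3, hl3⟩ := four_chars s3 h3
  have k1 : (keyOf s1).toList = [a0, a1, a2, a3] := by simp [keyOf, pysem, PySem.Str.slice, hl1]
  have k2 : (keyOf s2).toList = [b0, b1, b2, b3] := by simp [keyOf, pysem, PySem.Str.slice, hl2]
  have k3 : (keyOf s3).toList = [c0, c1, c2, c3] := by simp [keyOf, pysem, PySem.Str.slice, hl3]
  have h4 : PySem.List.pyRange 0 4 1 = [0, 1, 2, 3] := by decide
  have g1 : pvGetC s1 0 = a0 ∧ pvGetC s1 1 = a1 ∧ pvGetC s1 2 = a2 ∧ pvGetC s1 3 = a3 := by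
    simp [pvGetC, pysem, hl1]
  have g2 : pvGetC s2 0 = b0 ∧ pvGetC s2 1 = b1 ∧ pvGetC s2 2 = b2 ∧ pvGetC s2 3 = b3 := by
    simp [pvGetC, pysem, hl2]
  have g3 : pvGetC s3 0 = c0 ∧ pvGetC s3 1 = c1 ∧ pvGetC s3 2 = c2 ∧ pvGetC s3 3 = c3 := by
    simp [pvGetC, pysem, hl3]
  simp only [getnum, h4, List.foldl, G, pairSum, k1, k2, k3, List.zip_cons_cons, List.zip_nil_right,
    List.map, List.sum_cons, List.sum_nil, g1.1, g1.2.1, g1.2.2.1, g1.2.2.2,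
    g2.1, g2.2.1, g2.2.2.1, g2.2.2.2, g3.1, g3.2.1, g3.2.2.1, g3.2.2.2]
  simp only [getnum_step]
  ring

-- min-fold toolkit
theorem fmin_mem (c : Int) (L : List Int) : L.foldl min c = c ∨ L.foldl min c ∈ L := by
  induction L generalizing c with
  | nil => simp
  | cons x t ih =>
    rcases ih (min c x) with h | h
    · rcases min_choice c x with hc | hc <;> rw [List.foldl_cons, h, hc]
      · exact Or.inl rfl
      · exact Or.inr (List.mem_cons_self)
    · exact Or.inr (List.mem_cons_of_mem _ h)

theorem fmin_eq (c : Int) (L1 L2 : List Int)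
    (h1 : ∀ v ∈ L1, v ∈ L2) (h2 : ∀ v ∈ L2, v ∈ L1) :
    L1.foldl min c = L2.foldl min c := by
  apply le_antisymm
  · rcases fmin_mem c L2 with h | h
    · rw [h]; exact (PySem.List.foldl_min_le L1 c).1
    · exact (PySem.List.foldl_min_le L1 c).2 _ (h2 _ h)
  · rcases fmin_mem c L1 with h | h
    · rw [h]; exact (PySem.List.foldl_min_le L2 c).1
    · exact (PySem.List.foldl_min_le L2 c).2 _ (h1 _ h)

theorem foldl_min_flatMap {α : Type} (l : List α) (f : α → List Int) (c : Int) :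
    (l.flatMap f).foldl min c = l.foldl (fun r x => (f x).foldl min r) c := by
  induction l generalizing c with
  | nil => simp
  | cons x t ih => simp [List.foldl_append, ih]

-- flattened form of A's triple loop
theorem A_flat (f : Int → Int → Int → Int) (n : Int) :
    (PySem.List.pyRange 0 n 1).foldl (fun r i =>
      (PySem.List.pyRange (i + 1) n 1).foldl (fun r j =>
        (PySem.List.pyRange (j + 1) n 1).foldl (fun r k => min r (f i j k)) r) r) 12
    = ((PySem.List.pyRange 0 n 1).flatMap (fun i =>
        (PySem.List.pyRange (i + 1) n 1).flatMap (fun j =>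
          (PySem.List.pyRange (j + 1) n 1).map (f i j)))).foldl min 12 := by
  rw [foldl_min_flatMap]
  apply PySem.List.foldl_congr_mem
  intro r i _
  rw [foldl_min_flatMap]
  apply PySem.List.foldl_congr_mem
  intro r j _
  rw [List.foldl_map]

-- flattened form of B's guarded triple loop
theorem B_flat (ok : Int → Int → Int → Bool) (g : Int → Int → Int → Int) (m : Int) :
    (PySem.List.pyRange 0 m 1).foldl (fun r x =>
      (PySem.List.pyRange x m 1).foldl (fun r y =>
        (PySem.List.pyRange y m 1).foldl (fun r z =>
          if ok x y z then min r (g x y z) else r) r) r) 12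
    = ((PySem.List.pyRange 0 m 1).flatMap (fun x =>
        (PySem.List.pyRange x m 1).flatMap (fun y =>
          (((PySem.List.pyRange y m 1).filter (ok x y)).map (g x y))))).foldl min 12 := by
  rw [foldl_min_flatMap]
  apply PySem.List.foldl_congr_mem
  intro r x _
  rw [foldl_min_flatMap]
  apply PySem.List.foldl_congr_mem
  intro r y _
  rw [PySem.List.foldl_if_eq_foldl_filter, List.foldl_map]

-- count facts: indices to counts
theorem cnt_pair (l : List String) (i j : Nat) (hij : i < j) (hj : j < l.length)
    (v : String) (hvi : gd l i = v) (hvj : gd l j = v) : 2 ≤ l.count v := by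
  have hi : i < l.length := Nat.lt_trans hij hj
  have hvi' : l[i] = v := by simpa [gd, List.getD_eq_getElem, hi] using hvi
  have hvj' : l[j] = v := by simpa [gd, List.getD_eq_getElem, hj] using hvj
  have hsplit : l.count v = (l.take j).count v + (l.drop j).count v := by
    conv_lhs => rw [← List.take_append_drop j l]
    rw [List.count_append]
  have h1 : 0 < (l.take j).count v := by
    rw [List.count_pos_iff]
    refine List.mem_iff_getElem.2 ⟨i, by simp [hi, hij], ?_⟩
    rw [List.getElem_take]
    exact hvi'
  have h2 : 0 < (l.drop j).count v := by
    rw [List.count_pos_iff, ← List.getElem_cons_drop hj]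
    exact List.mem_cons.2 (Or.inl hvj'.symm)
  omega

theorem cnt_triple (l : List String) (i j k : Nat) (hij : i < j) (hjk : j < k)
    (hk : k < l.length) (v : String) (hvi : gd l i = v) (hvj : gd l j = v)
    (hvk : gd l k = v) : 3 ≤ l.count v := by
  have hj : j < l.length := Nat.lt_trans hjk hk
  have hi : i < l.length := Nat.lt_trans hij hj
  have hvi' : l[i] = v := by simpa [gd, List.getD_eq_getElem, hi] using hvi
  have hvj' : l[j] = v := by simpa [gd, List.getD_eq_getElem, hj] using hvj
  have hvk' : l[k] = v := by simpa [gd, List.getD_eq_getElem, hk] using hvk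
  have hsplit : l.count v = (l.take j).count v + (l.drop j).count v := by
    conv_lhs => rw [← List.take_append_drop j l]
    rw [List.count_append]
  have h1 : 0 < (l.take j).count v := by
    rw [List.count_pos_iff]
    refine List.mem_iff_getElem.2 ⟨i, by simp [hi, hij], ?_⟩
    rw [List.getElem_take]
    exact hvi'
  have h2 : (l.drop j).count v = (l.drop (j+1)).count v + 1 := by
    rw [← List.getElem_cons_drop hj, List.count_cons, if_pos (by simp [hvj'])]
  have h3 : 0 < (l.drop (j+1)).count v := by
    rw [List.count_pos_iff]
    refine List.mem_iff_getElem.2 ⟨k - (j+1), by simp; omega, ?_⟩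
    rw [List.getElem_drop]
    have : j + 1 + (k - (j + 1)) = k := by omega
    simp only [this]
    exact hvk'
  rw [hsplit, h2]
  omega

-- counts to indices
theorem mem_idx (l : List String) (v : String) (h : v ∈ l) :
    ∃ i, i < l.length ∧ gd l i = v := by
  obtain ⟨i, hi, he⟩ := List.mem_iff_getElem.1 h
  exact ⟨i, hi, by simp [gd, List.getD_eq_getElem, hi, he]⟩

theorem cnt2' (l : List String) (v : String) :
    2 ≤ l.count v → ∃ i j, i < j ∧ j < l.length ∧ gd l i = v ∧ gd l j = v := by
  induction l with
  | nil => intro h; simp at h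
  | cons s t ih =>
    intro h
    by_cases hs : s = v
    · have hc : 1 ≤ t.count v := by simp [List.count_cons, hs, eq_comm] at h ⊢; omega
      have hv : v ∈ t := List.count_pos_iff.1 (by omega)
      obtain ⟨i, hi, he⟩ := mem_idx t v hv
      exact ⟨0, i + 1, by omega, by simp; omega, by simpa [gd] using hs, by simpa [gd] using he⟩
    · have hc : 2 ≤ t.count v := by simp [List.count_cons, hs, eq_comm] at h ⊢; omega
      obtain ⟨i, j, hij, hj, he1, he2⟩ := ih hc
      exact ⟨i + 1, j + 1, by omega, by simp; omega, by simpa [gd] using he1,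
        by simpa [gd] using he2⟩

theorem cnt3' (l : List String) (v : String) :
    3 ≤ l.count v → ∃ i j k, i < j ∧ j < k ∧ k < l.length ∧
      gd l i = v ∧ gd l j = v ∧ gd l k = v := by
  induction l with
  | nil => intro h; simp at h
  | cons s t ih =>
    intro h
    by_cases hs : s = v
    · have hc : 2 ≤ t.count v := by simp [List.count_cons, hs, eq_comm] at h ⊢; omega
      obtain ⟨i, j, hij, hj, he1, he2⟩ := cnt2' t v hc
      exact ⟨0, i + 1, j + 1, by omega, by omega, by simp; omega,
        by simpa [gd] using hs, by simpa [gd] using he1, by simpa [gd] using he2⟩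
    · have hc : 3 ≤ t.count v := by simp [List.count_cons, hs, eq_comm] at h ⊢; omega
      obtain ⟨i, j, k, hij, hjk, hk, he1, he2, he3⟩ := ih hc
      exact ⟨i + 1, j + 1, k + 1, by omega, by omega, by simp; omega,
        by simpa [gd] using he1, by simpa [gd] using he2, by simpa [gd] using he3⟩

-- two/three equal among a literal triple, from its count
theorem two_of_three {p1 p2 p3 x : Nat} (h : 2 ≤ ([p1, p2, p3].count x)) :
    (p1 = x ∧ p2 = x) ∨ (p1 = x ∧ p3 = x) ∨ (p2 = x ∧ p3 = x) := by
  by_cases e1 : p1 = x <;> by_cases e2 : p2 = x <;> by_cases e3 : p3 = x <;>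
    simp [List.count_cons, e1, e2, e3] at h ⊢ <;> tauto

theorem three_of_three {p1 p2 p3 x : Nat} (h : 3 ≤ ([p1, p2, p3].count x)) :
    p1 = x ∧ p2 = x ∧ p3 = x := by
  by_cases e1 : p1 = x <;> by_cases e2 : p2 = x <;> by_cases e3 : p3 = x <;>
    simp [List.count_cons, e1, e2, e3] at h ⊢ <;> tauto

-- sorting three distinct indices, preserving G
theorem sort3 (f : Nat → String) (a b c : Nat) (hab : a ≠ b) (hac : a ≠ c) (hbc : b ≠ c) :
    ∃ p q r, p < q ∧ q < r ∧ (p = a ∨ p = b ∨ p = c) ∧ (q = a ∨ q = b ∨ q = c) ∧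
      (r = a ∨ r = b ∨ r = c) ∧ G (f p) (f q) (f r) = G (f a) (f b) (f c) := by
  rcases lt_or_gt_of_ne hab with h1 | h1 <;> rcases lt_or_gt_of_ne hac with h2 | h2 <;>
    rcases lt_or_gt_of_ne hbc with h3 | h3
  · exact ⟨a, b, c, h1, h3, by tauto, by tauto, by tauto, rfl⟩
  · exact ⟨a, c, b, h2, h3, by tauto, by tauto, by tauto, Gswap2 ..⟩
  · omega
  · refine ⟨c, a, b, h2, h1, by tauto, by tauto, by tauto, ?_⟩
    rw [Gswap1, Gswap2]
  · exact ⟨b, a, c, h1, h2, by tauto, by tauto, by tauto, Gswap1 ..⟩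
  · omega
  · refine ⟨b, c, a, h3, h2, by tauto, by tauto, by tauto, ?_⟩
    rw [Gswap2, Gswap1]
  · refine ⟨c, b, a, h3, h1, by tauto, by tauto, by tauto, ?_⟩
    rw [Gswap1, Gswap2, Gswap1]

-- arranging three indices (with possible ties) in weakly increasing order, preserving G
theorem sortle3 (f : Nat → String) (a b c : Nat) :
    ∃ p q r, p ≤ q ∧ q ≤ r ∧ ([p, q, r] : List Nat).Perm [a, b, c] ∧
      G (f p) (f q) (f r) = G (f a) (f b) (f c) := by
  rcases Nat.le_total a b with h1 | h1 <;> rcases Nat.le_total b c with h2 | h2 <;>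
    rcases Nat.le_total a c with h3 | h3
  · exact ⟨a, b, c, h1, h2, List.Perm.refl _, rfl⟩
  · exact ⟨a, b, c, h1, h2, List.Perm.refl _, rfl⟩
  · exact ⟨a, c, b, h3, h2, (List.Perm.swap b c []).cons a, Gswap2 ..⟩
  · refine ⟨c, a, b, h3, h1, (List.Perm.swap a c [b]).trans ((List.Perm.swap b c []).cons a), ?_⟩
    rw [Gswap1, Gswap2]
  · exact ⟨b, a, c, h1, h3, List.Perm.swap a b [c], Gswap1 ..⟩
  · refine ⟨b, c, a, h2, h3, ((List.Perm.swap a c []).cons b).trans (List.Perm.swap a b [c]), ?_⟩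
    rw [Gswap2, Gswap1]
  · exact ⟨a, b, c, by omega, by omega, List.Perm.refl _, rfl⟩
  · refine ⟨c, b, a, h2, h1,
      ((List.Perm.swap b c [a]).trans ((List.Perm.swap a c []).cons b)).trans
        (List.Perm.swap a b [c]), ?_⟩
    rw [Gswap1, Gswap2, Gswap1]

-- every A-triple value is a feasible B-candidate value
theorem dirA (ks : List String) (i j k : Nat) (hij : i < j) (hjk : j < k)
    (hk : k < ks.length) :
    ∃ x y z : Nat, x ≤ y ∧ y ≤ z ∧ z < (PySem.Set.ofList ks).length ∧ okN ks x y z = true ∧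
      G (gd (PySem.Set.ofList ks) x) (gd (PySem.Set.ofList ks) y) (gd (PySem.Set.ofList ks) z)
        = G (gd ks i) (gd ks j) (gd ks k) := by
  have hj : j < ks.length := Nat.lt_trans hjk hk
  have hi : i < ks.length := Nat.lt_trans hij hj
  have hik : i < k := Nat.lt_trans hij hjk
  set keys := PySem.Set.ofList ks with hkeys
  have hmem : ∀ t, t < ks.length → gd ks t ∈ keys := by
    intro t ht
    have h1 : gd ks t = ks[t] := by simp [gd, List.getD_eq_getElem, ht]
    rw [h1, hkeys, PySem.Set.mem_ofList]
    exact List.getElem_mem _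
  have hpa : keys.idxOf (gd ks i) < keys.length := List.idxOf_lt_length_of_mem (hmem i hi)
  have hpb : keys.idxOf (gd ks j) < keys.length := List.idxOf_lt_length_of_mem (hmem j hj)
  have hpc : keys.idxOf (gd ks k) < keys.length := List.idxOf_lt_length_of_mem (hmem k hk)
  set pa := keys.idxOf (gd ks i) with hpa_def
  set pb := keys.idxOf (gd ks j) with hpb_def
  set pc := keys.idxOf (gd ks k) with hpc_def
  have hkpa : gd keys pa = gd ks i := by
    rw [show gd keys pa = keys[pa] from by simp [gd, List.getD_eq_getElem, hpa]]
    exact List.getElem_idxOf hpa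
  have hkpb : gd keys pb = gd ks j := by
    rw [show gd keys pb = keys[pb] from by simp [gd, List.getD_eq_getElem, hpb]]
    exact List.getElem_idxOf hpb
  have hkpc : gd keys pc = gd ks k := by
    rw [show gd keys pc = keys[pc] from by simp [gd, List.getD_eq_getElem, hpc]]
    exact List.getElem_idxOf hpc
  obtain ⟨x, y, z, hxy, hyz, hperm, hG⟩ := sortle3 (gd keys) pa pb pc
  have hz : z < keys.length := by
    have hzm : z ∈ [pa, pb, pc] := hperm.subset (by simp)
    simp only [List.mem_cons, List.mem_singleton, List.not_mem_nil, or_false] at hzm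
    rcases hzm with h | h | h <;> omega
  refine ⟨x, y, z, hxy, hyz, hz, ?_, ?_⟩
  · unfold okN
    rw [← hkeys]
    split_ifs with hc1 hc2 hc3
    · obtain ⟨exy, eyz⟩ := hc1
      have hcnt : 3 ≤ [pa, pb, pc].count x := by
        rw [← hperm.count_eq, ← eyz, ← exy]
        simp
      obtain ⟨ea, eb, ec⟩ := three_of_three hcnt
      have e1 : gd keys x = gd ks i := by rw [← ea]; exact hkpa
      have e2 : gd keys x = gd ks j := by rw [← eb]; exact hkpb
      have e3 : gd keys x = gd ks k := by rw [← ec]; exact hkpc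
      simp only [decide_eq_true_eq]
      exact_mod_cast cnt_triple ks i j k hij hjk hk (gd keys x) e1.symm e2.symm e3.symm
    · have hcnt : 2 ≤ [pa, pb, pc].count x := by
        rw [← hperm.count_eq, ← hc2]
        by_cases h : z = x <;> simp [List.count_cons, h]
      simp only [decide_eq_true_eq]
      rcases two_of_three hcnt with ⟨ea, eb⟩ | ⟨ea, ec⟩ | ⟨eb, ec⟩
      · have e1 : gd keys x = gd ks i := by rw [← ea]; exact hkpa
        have e2 : gd keys x = gd ks j := by rw [← eb]; exact hkpb
        exact_mod_cast cnt_pair ks i j hij hj (gd keys x) e1.symm e2.symm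
      · have e1 : gd keys x = gd ks i := by rw [← ea]; exact hkpa
        have e3 : gd keys x = gd ks k := by rw [← ec]; exact hkpc
        exact_mod_cast cnt_pair ks i k hik hk (gd keys x) e1.symm e3.symm
      · have e2 : gd keys x = gd ks j := by rw [← eb]; exact hkpb
        have e3 : gd keys x = gd ks k := by rw [← ec]; exact hkpc
        exact_mod_cast cnt_pair ks j k hjk hk (gd keys x) e2.symm e3.symm
    · have hcnt : 2 ≤ [pa, pb, pc].count y := by
        rw [← hperm.count_eq, ← hc3]
        by_cases h : x = y <;> simp [List.count_cons, h]
      simp only [decide_eq_true_eq]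
      rcases two_of_three hcnt with ⟨ea, eb⟩ | ⟨ea, ec⟩ | ⟨eb, ec⟩
      · have e1 : gd keys y = gd ks i := by rw [← ea]; exact hkpa
        have e2 : gd keys y = gd ks j := by rw [← eb]; exact hkpb
        exact_mod_cast cnt_pair ks i j hij hj (gd keys y) e1.symm e2.symm
      · have e1 : gd keys y = gd ks i := by rw [← ea]; exact hkpa
        have e3 : gd keys y = gd ks k := by rw [← ec]; exact hkpc
        exact_mod_cast cnt_pair ks i k hik hk (gd keys y) e1.symm e3.symm
      · have e2 : gd keys y = gd ks j := by rw [← eb]; exact hkpb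
        have e3 : gd keys y = gd ks k := by rw [← ec]; exact hkpc
        exact_mod_cast cnt_pair ks j k hjk hk (gd keys y) e2.symm e3.symm
    · rfl
  · rw [hkpa, hkpb, hkpc] at hG
    exact hG

-- every feasible B-candidate value is an A-triple value
theorem dirB (ks : List String) (x y z : Nat) (hxy : x ≤ y) (hyz : y ≤ z)
    (hz : z < (PySem.Set.ofList ks).length) (hok : okN ks x y z = true) :
    ∃ i j k : Nat, i < j ∧ j < k ∧ k < ks.length ∧
      G (gd ks i) (gd ks j) (gd ks k)
        = G (gd (PySem.Set.ofList ks) x) (gd (PySem.Set.ofList ks) y) (gd (PySem.Set.ofList ks) z) := by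
  have hnd : (PySem.Set.ofList ks).Nodup := PySem.Set.nodup_ofList ks
  set keys := PySem.Set.ofList ks with hkeys
  have hy : y < keys.length := lt_of_le_of_lt hyz hz
  have hx : x < keys.length := lt_of_le_of_lt hxy hy
  have hmem : ∀ t, t < keys.length → gd keys t ∈ ks := by
    intro t ht
    have h1 : gd keys t = keys[t] := by simp [gd, List.getD_eq_getElem, ht]
    rw [h1]
    have h2 : keys[t] ∈ keys := List.getElem_mem ht
    rwa [PySem.Set.mem_ofList] at h2
  have hinj : ∀ s t, s < keys.length → t < keys.length → gd keys s = gd keys t → s = t := by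
    intro s t hs ht he
    have h1 : keys[s] = keys[t] := by
      simpa [gd, List.getD_eq_getElem, hs, ht] using he
    exact (List.Nodup.getElem_inj_iff hnd).1 h1
  unfold okN at hok
  rw [← hkeys] at hok
  split_ifs at hok with hc1 hc2 hc3
  · obtain ⟨exy, eyz⟩ := hc1
    simp only [decide_eq_true_eq] at hok
    obtain ⟨i, j, k, hij, hjk, hk, e1, e2, e3⟩ :=
      cnt3' ks (gd keys x) (by exact_mod_cast hok)
    refine ⟨i, j, k, hij, hjk, hk, ?_⟩
    rw [e1, e2, e3, ← eyz, ← exy]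
  · have hc2' : x = y := hc2
    have hyz' : y < z := lt_of_le_of_ne hyz (fun e => hc1 ⟨hc2', e⟩)
    have hxz : x ≠ z := by omega
    simp only [decide_eq_true_eq] at hok
    obtain ⟨i, j, hij, hj, e1, e2⟩ := cnt2' ks (gd keys x) (by exact_mod_cast hok)
    obtain ⟨t, ht, et⟩ := mem_idx ks (gd keys z) (hmem z hz)
    have hne : gd keys z ≠ gd keys x := fun e => hxz ((hinj z x hz hx e).symm)
    have hti : t ≠ i := fun e => hne (by rw [← et, e, e1])
    have htj : t ≠ j := fun e => hne (by rw [← et, e, e2])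
    obtain ⟨p, q, r, hpq, hqr, mp, mq, mr, hG⟩ :=
      sort3 (gd ks) i j t (Nat.ne_of_lt hij) (Ne.symm hti) (Ne.symm htj)
    have hi : i < ks.length := Nat.lt_trans hij hj
    have hrlen : r < ks.length := by rcases mr with h | h | h <;> omega
    refine ⟨p, q, r, hpq, hqr, hrlen, ?_⟩
    rw [hG, e1, e2, et, hc2']
  · have hxy' : x < y := lt_of_le_of_ne hxy hc2
    simp only [decide_eq_true_eq] at hok
    obtain ⟨i, j, hij, hj, e1, e2⟩ := cnt2' ks (gd keys y) (by exact_mod_cast hok)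
    obtain ⟨t, ht, et⟩ := mem_idx ks (gd keys x) (hmem x hx)
    have hne : gd keys x ≠ gd keys y := fun e => hc2 (hinj x y hx hy e)
    have hti : t ≠ i := fun e => hne (by rw [← et, e, e1])
    have htj : t ≠ j := fun e => hne (by rw [← et, e, e2])
    obtain ⟨p, q, r, hpq, hqr, mp, mq, mr, hG⟩ :=
      sort3 (gd ks) t i j hti htj (Nat.ne_of_lt hij)
    have hi : i < ks.length := Nat.lt_trans hij hj
    have hrlen : r < ks.length := by rcases mr with h | h | h <;> omega
    refine ⟨p, q, r, hpq, hqr, hrlen, ?_⟩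
    rw [hG, e1, e2, et, ← hc3]
  · have hxy' : x < y := lt_of_le_of_ne hxy hc2
    have hyz' : y < z := lt_of_le_of_ne hyz hc3
    obtain ⟨t1, ht1, e1⟩ := mem_idx ks (gd keys x) (hmem x hx)
    obtain ⟨t2, ht2, e2⟩ := mem_idx ks (gd keys y) (hmem y hy)
    obtain ⟨t3, ht3, e3⟩ := mem_idx ks (gd keys z) (hmem z hz)
    have d12 : gd keys x ≠ gd keys y := fun e => (by omega : x ≠ y) (hinj x y hx hy e)
    have d13 : gd keys x ≠ gd keys z := fun e => (by omega : x ≠ z) (hinj x z hx hz e)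
    have d23 : gd keys y ≠ gd keys z := fun e => (by omega : y ≠ z) (hinj y z hy hz e)
    have n12 : t1 ≠ t2 := fun e => d12 (by rw [← e1, e, e2])
    have n13 : t1 ≠ t3 := fun e => d13 (by rw [← e1, e, e3])
    have n23 : t2 ≠ t3 := fun e => d23 (by rw [← e2, e, e3])
    obtain ⟨p, q, r, hpq, hqr, mp, mq, mr, hG⟩ := sort3 (gd ks) t1 t2 t3 n12 n13 n23
    have hrlen : r < ks.length := by rcases mr with h | h | h <;> omega
    refine ⟨p, q, r, hpq, hqr, hrlen, ?_⟩
    rw [hG, e1, e2, e3]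


-- Int-index wrappers aligning the ports' accessors with the Nat-level lemmas
def gdI (l : List String) (t : Int) : String := gd l t.toNat

def okI (ks : List String) (x y z : Int) : Bool :=
  if x = y ∧ y = z then decide (3 ≤ (ks.count (gdI (PySem.Set.ofList ks) x) : Int))
  else if x = y then decide (2 ≤ (ks.count (gdI (PySem.Set.ofList ks) x) : Int))
  else if y = z then decide (2 ≤ (ks.count (gdI (PySem.Set.ofList ks) y) : Int))
  else true

theorem okI_cast (ks : List String) (x y z : Nat) : okI ks ↑x ↑y ↑z = okN ks x y z := by
  unfold okI okN gdI
  simp only [Nat.cast_inj, Int.toNat_natCast]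
  rfl

theorem pvGetS_eq (l : List String) (i : Int) (h0 : 0 ≤ i) : pvGetS l i = gdI l i := by
  have h := PySem.List.pyGetD_of_nonneg (xs := l) (d := "") h0
  simpa [pvGetS, gdI, gd, PySem.List.pyGetD] using h

-- for fewer than three strings A's triple loop never runs and leaves ret = 12
theorem tripleA_small (arr : List String) (h : arr.length < 3) :
    (PySem.List.pyRange 0 (arr.length : Int) 1).foldl (fun ret i =>
      (PySem.List.pyRange (i + 1) (arr.length : Int) 1).foldl (fun ret j =>
        (PySem.List.pyRange (j + 1) (arr.length : Int) 1).foldl (fun ret k =>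
          min ret (getnum (pvGetS arr i) (pvGetS arr j) (pvGetS arr k))) ret) ret) 12 = 12 := by
  match arr, h with
  | [], _ => simp [PySem.List.pyRange_one_eq_nil]
  | [a], _ =>
    rw [show (([a].length : Int)) = 1 from rfl]
    simp [show PySem.List.pyRange 0 1 1 = [0] from by decide,
      show PySem.List.pyRange 1 1 1 = ([] : List Int) from by decide]
  | [a, b], _ =>
    rw [show (([a, b].length : Int)) = 2 from rfl]
    simp [show PySem.List.pyRange 0 2 1 = [0, 1] from by decide,
      show PySem.List.pyRange 1 2 1 = [1] from by decide,
      show PySem.List.pyRange 2 2 1 = ([] : List Int) from by decide]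

-- ===== VERDICT (by name: the statement is the Claim_ definition above) =====
theorem solution_spec : Claim_equal_solution := by
  intro arr _ hpre
  show solution arr = solution_alt arr
  unfold solution solution_alt
  by_cases h32 : (arr.length : Int) > 32
  · simp [h32]
  · by_cases h3 : (arr.length : Int) < 3
    · simp only [h32, h3, if_neg, if_pos, not_false_eq_true]
      exact tripleA_small arr (by exact_mod_cast h3)
    · simp only [h32, h3, if_false]
      have hlen4 : ∀ s ∈ arr, 4 ≤ s.toList.length := by
        rcases hpre with h | h | h
        · exact absurd h h32
        · exact absurd (by exact_mod_cast h) h3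
        · exact h
      set n : Int := (arr.length : Int) with hn
      set ks : List String := arr.map keyOf with hks
      have hlks : ks.length = arr.length := by rw [hks]; simp
      have hmem4 : ∀ t : Nat, t < arr.length → 4 ≤ (arr.getD t "").toList.length := by
        intro t ht
        rw [List.getD_eq_getElem _ _ ht]
        exact hlen4 _ (List.getElem_mem ht)
      -- A side: replace getnum by G over keys
      have hA : (PySem.List.pyRange 0 n 1).foldl (fun ret i =>
            (PySem.List.pyRange (i + 1) n 1).foldl (fun ret j =>
              (PySem.List.pyRange (j + 1) n 1).foldl (fun ret k =>
                min ret (getnum (pvGetS arr i) (pvGetS arr j) (pvGetS arr k))) ret) ret) 12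
          = (PySem.List.pyRange 0 n 1).foldl (fun ret i =>
            (PySem.List.pyRange (i + 1) n 1).foldl (fun ret j =>
              (PySem.List.pyRange (j + 1) n 1).foldl (fun ret k =>
                min ret (G (gdI ks i) (gdI ks j) (gdI ks k))) ret) ret) 12 := by
        apply PySem.List.foldl_congr_mem
        intro r i hi
        rw [PySem.List.mem_pyRange_one] at hi
        apply PySem.List.foldl_congr_mem
        intro r j hj
        rw [PySem.List.mem_pyRange_one] at hj
        apply PySem.List.foldl_congr_mem
        intro r k hk
        rw [PySem.List.mem_pyRange_one] at hk
        congr 1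
        have b1 : i.toNat < arr.length := by omega
        have b2 : j.toNat < arr.length := by omega
        have b3 : k.toNat < arr.length := by omega
        have e1 : pvGetS arr i = arr.getD i.toNat "" := by rw [pvGetS_eq arr i (by omega)]; rfl
        have e2 : pvGetS arr j = arr.getD j.toNat "" := by rw [pvGetS_eq arr j (by omega)]; rfl
        have e3 : pvGetS arr k = arr.getD k.toNat "" := by rw [pvGetS_eq arr k (by omega)]; rfl
        rw [e1, e2, e3,
          getnum_eq _ _ _ (hmem4 _ b1) (hmem4 _ b2) (hmem4 _ b3)]
        simp [gdI, gd, hks, List.getD_eq_getElem, b1, b2, b3]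
      rw [hA, A_flat (fun i j k => G (gdI ks i) (gdI ks j) (gdI ks k)) n]
      -- B side: counter facts, then replace the body by okI / G over keys
      have hcnt : arr.foldl (fun d s =>
            d.insert (keyOf s) (d.getD (keyOf s) 0 + 1)) PySem.Dict.empty
          = PySem.Dict.counter ks := by
        rw [hks, ← PySem.Dict.foldl_insert_getD_add_one_eq_counter, List.foldl_map]
      simp only [hcnt, PySem.Dict.keys_counter, PySem.Dict.getD_counter]
      set m : Int := ((PySem.Set.ofList ks).length : Int) with hm
      have hB : (PySem.List.pyRange 0 m 1).foldl (fun best x =>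
            (PySem.List.pyRange x m 1).foldl (fun best y =>
              (PySem.List.pyRange y m 1).foldl (fun best z =>
                if (if x = y ∧ y = z then
                      decide (3 ≤ (ks.count (pvGetS (PySem.Set.ofList ks) x) : Int))
                    else if x = y then
                      decide (2 ≤ (ks.count (pvGetS (PySem.Set.ofList ks) x) : Int))
                    else if y = z then
                      decide (2 ≤ (ks.count (pvGetS (PySem.Set.ofList ks) y) : Int))
                    else true) then
                  min best (pairSum (pvGetS (PySem.Set.ofList ks) x) (pvGetS (PySem.Set.ofList ks) y) +
                            pairSum (pvGetS (PySem.Set.ofList ks) x) (pvGetS (PySem.Set.ofList ks) z) +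
                            pairSum (pvGetS (PySem.Set.ofList ks) y) (pvGetS (PySem.Set.ofList ks) z))
                else best) best) best) 12
          = (PySem.List.pyRange 0 m 1).foldl (fun best x =>
            (PySem.List.pyRange x m 1).foldl (fun best y =>
              (PySem.List.pyRange y m 1).foldl (fun best z =>
                if okI ks x y z then
                  min best (G (gdI (PySem.Set.ofList ks) x) (gdI (PySem.Set.ofList ks) y)
                    (gdI (PySem.Set.ofList ks) z))
                else best) best) best) 12 := by
        apply PySem.List.foldl_congr_mem
        intro r x hx
        rw [PySem.List.mem_pyRange_one] at hx
        apply PySem.List.foldl_congr_mem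
        intro r y hy
        rw [PySem.List.mem_pyRange_one] at hy
        apply PySem.List.foldl_congr_mem
        intro r z hz
        rw [PySem.List.mem_pyRange_one] at hz
        rw [pvGetS_eq _ x hx.1, pvGetS_eq _ y (by omega), pvGetS_eq _ z (by omega)]
        rfl
      rw [hB, B_flat (okI ks)
        (fun x y z => G (gdI (PySem.Set.ofList ks) x) (gdI (PySem.Set.ofList ks) y)
          (gdI (PySem.Set.ofList ks) z)) m]
      apply fmin_eq
      · intro v hv
        simp only [List.mem_flatMap, List.mem_map, List.mem_filter,
          PySem.List.mem_pyRange_one] at hv ⊢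
        obtain ⟨i, ⟨hi0, hin⟩, j, ⟨hj1, hjn⟩, k, ⟨hk1, hkn⟩, hveq⟩ := hv
        obtain ⟨x, y, z, hxy, hyz, hzlt, hok, hGeq⟩ :=
          dirA ks i.toNat j.toNat k.toNat (by omega) (by omega) (by omega)
        refine ⟨(x : Int), ⟨by omega, by omega⟩, (y : Int), ⟨by omega, by omega⟩,
          (z : Int), ⟨⟨by omega, by omega⟩, ?_⟩, ?_⟩
        · rw [okI_cast]; exact hok
        · simp only [gdI, Int.toNat_natCast]
          simp only [gdI] at hveq
          rw [hGeq]
          exact hveq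
      · intro v hv
        simp only [List.mem_flatMap, List.mem_map, List.mem_filter,
          PySem.List.mem_pyRange_one] at hv ⊢
        obtain ⟨x, ⟨hx0, hxm⟩, y, ⟨hy1, hym⟩, z, ⟨⟨hz1, hzm⟩, hok⟩, hveq⟩ := hv
        have hok' : okN ks x.toNat y.toNat z.toNat = true := by
          rw [← okI_cast]
          simpa [Int.toNat_of_nonneg, hx0, show (0:Int) ≤ y by omega,
            show (0:Int) ≤ z by omega] using hok
        obtain ⟨i, j, k, hij, hjk, hk, hGeq⟩ :=
          dirB ks x.toNat y.toNat z.toNat (by omega) (by omega) (by omega) hok'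
        refine ⟨(i : Int), ⟨by omega, by omega⟩, (j : Int), ⟨by omega, by omega⟩,
          (k : Int), ⟨by omega, by omega⟩, ?_⟩
        simp only [gdI, Int.toNat_natCast]
        rw [hGeq]
        simp only [gdI] at hveq
        convert hveq using 3 <;> omega
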